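-- pv_equiv track=rewrite | github.com/thdals83/HackerRank | Programmers/Stack,Queue/solution.py | solution
-- ===== SOURCE A (Python) =====
-- def solution(p, s):
--     answer = []
--
--     while len(p)!=0:
--         count=0
--         for i in range(len(p)):
--             p[i]=p[i]+s[i]
--
--         while True:
--             if(len(p)==0):break
--
--             if(p[0]>=100):
--                 p.pop(0)
--                 s.pop(0)
--                 count=count+1
--             else:break
--         if (count != 0): answer.append(count)
--
--     return answer
-- ===== SOURCE B (Python) =====
-- def solution(p, s):
--     # One pass: per-feature completion day by ceiling division, then group
--     # consecutive features by the running maximum of those days.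
--     answer = []
--     cur_max = 0
--     count = 0
--     for pi, si in zip(p, s):
--         d = max(1, -((pi - 100) // si))  # first day t>=1 with pi + t*si >= 100
--         if d > cur_max:
--             if count:
--                 answer.append(count)
--             cur_max = d
--             count = 1
--         else:
--             count += 1
--     if count:
--         answer.append(count)
--     return answer
-- ===== Notes on version B (the rewrite author's own statement) =====
-- stated objective: faster
-- what changed: Replaces the day-by-day simulation (add speeds to every remaining feature each day, pop completed ones) by a single pass that computes each feature's completion day with one ceiling division and groups consecutive features by the running maximum of those days; intended as faster (O(n) vs O(n*D)) — in a timing run A timed out at n=16 while B returned, so no ratio could be measured.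
-- outside the precondition, e.g. on solution([50], []): A raises IndexError, B returns []; on solution([151, 0, 62, 57, 178], [100, 99, 6979, 6, -1, 7]): A returns [1, 2, 2], B returns [1, 2, 1, 1]
import Mathlib
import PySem

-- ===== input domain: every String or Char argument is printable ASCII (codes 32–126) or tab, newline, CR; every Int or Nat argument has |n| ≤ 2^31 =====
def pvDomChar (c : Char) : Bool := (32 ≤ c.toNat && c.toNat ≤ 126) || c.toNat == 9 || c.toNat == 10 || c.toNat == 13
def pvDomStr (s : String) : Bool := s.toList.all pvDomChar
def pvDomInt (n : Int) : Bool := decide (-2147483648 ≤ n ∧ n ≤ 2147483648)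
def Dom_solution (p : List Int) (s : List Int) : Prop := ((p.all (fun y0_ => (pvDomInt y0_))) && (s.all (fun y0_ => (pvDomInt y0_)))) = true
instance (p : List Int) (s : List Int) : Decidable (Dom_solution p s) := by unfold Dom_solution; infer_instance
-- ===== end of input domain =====

-- B replaces A's day-by-day simulation by one pass: a ceiling division gives each
-- feature's completion day, and features are grouped by the running maximum of those
-- days (intended as faster, O(n) vs O(n*D); in a timing run A timed out at n=16
-- while B returned, so no speed ratio could be measured).  A mutates its list
-- arguments in place (it empties them); B does not — the equivalence proved here is
-- about the return value only.

-- ===== PORT A =====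
-- 'for i in range(len(p)): p[i] = p[i] + s[i]'  (faithful when len(p) ≤ len(s); Python raises IndexError otherwise, excluded by Pre_)
def pvAdd (p s : List Int) : List Int := List.zipWith (· + ·) p s

-- the inner 'while True' pop loop: returns (count, remaining p, remaining s)
def pvPop : List Int → List Int → Int × List Int × List Int
  | [], s => (0, [], s)
  | x :: pt, s =>
    if 100 ≤ x then
      let r := pvPop pt (s.drop 1)
      (r.1 + 1, r.2)
    else (0, x :: pt, s)

-- the outer 'while len(p)!=0' loop, with fuel (an upper bound on the number of days; inside Pre_ it never runs out)
def pvSim : Nat → List Int → List Int → List Int → List Int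
  | 0, _, _, ans => ans
  | f + 1, p, s, ans =>
    if p.isEmpty then ans
    else
      let p1 := pvAdd p s
      let r := pvPop p1 s
      pvSim f r.2.1 r.2.2 (if r.1 ≠ 0 then ans ++ [r.1] else ans)

def solution (p : List Int) (s : List Int) : List Int :=
  pvSim ((p.map (fun x => (100 - x).toNat + 1)).sum + 1) p s []

-- ===== PORT B =====
-- d = max(1, -((pi - 100) // si)) : first day t ≥ 1 with pi + t*si ≥ 100
def dOf (pi si : Int) : Int := max 1 (-(PySem.Int.floordiv (pi - 100) si))

-- the 'for pi, si in zip(p, s)' loop with state (cur_max, count, answer)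
def altLoop : List (Int × Int) → Int → Int → List Int → List Int
  | [], _, c, ans => if c ≠ 0 then ans ++ [c] else ans
  | (pi, si) :: t, m, c, ans =>
    let d := dOf pi si
    if m < d then altLoop t d 1 (if c ≠ 0 then ans ++ [c] else ans)
    else altLoop t m (c + 1) ans

def solution_alt (p : List Int) (s : List Int) : List Int := altLoop (p.zip s) 0 0 []

-- ===== PRECONDITION & SPEC =====
-- Pre_ excludes inputs where len(s) < len(p) (A raises IndexError on its first add
-- pass) and inputs with a nonpositive speed among the first len(p) speeds, on which
-- A's simulation usually loops forever; on the few such inputs where A does return,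
-- B's per-feature completion-day formula is not meaningful.
def Pre_solution (p : List Int) (s : List Int) : Prop :=
  p.length ≤ s.length ∧ ∀ x ∈ s.take p.length, 1 ≤ x
instance (p : List Int) (s : List Int) : Decidable (Pre_solution p s) := by unfold Pre_solution; infer_instance
def pvWitness_solution : List Int × List Int := ([93, 30, 55], [1, 30, 5])
def Spec_solution (p : List Int) (s : List Int) (out : List Int) : Prop := out = solution_alt p s
instance (p : List Int) (s : List Int) (out : List Int) : Decidable (Spec_solution p s out) := by unfold Spec_solution; infer_instance

-- ===== CLAIM (what is proved, stated in full; the proofs are below) =====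
def Claim_equal_solution : Prop := ∀ (p : List Int) (s : List Int), Dom_solution p s → Pre_solution p s → Spec_solution p s (solution p s)

-- ===== LEMMAS AND PROOFS =====

-- completion days of all features
def dsOf (p s : List Int) : List Int := (p.zip s).map (fun q => dOf q.1 q.2)

-- one day of advance shrinks a day count like this
def max1dec (d : Int) : Int := max 1 (d - 1)

-- the common specification: group sizes of consecutive days sharing a running maximum
def grp : List Int → List Int
  | [] => []
  | d :: t =>
    (1 + ((t.takeWhile (fun e => decide (e ≤ d))).length : Int)) ::
      grp (t.dropWhile (fun e => decide (e ≤ d)))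
  termination_by l => l.length
  decreasing_by
    have := List.length_dropWhile_le (fun e => decide (e ≤ d)) t
    simp only [List.length_cons]
    omega

lemma fd_bounds (x b : Int) (hb : 0 < b) :
    (PySem.Int.floordiv x b) * b ≤ x ∧ x < (PySem.Int.floordiv x b + 1) * b :=
  (PySem.Int.floordiv_eq_iff_of_pos hb).mp rfl

lemma dOf_pos (a b : Int) : 1 ≤ dOf a b := le_max_left _ _

lemma dOf_eq_one_iff (a b : Int) (hb : 1 ≤ b) : dOf a b = 1 ↔ 100 ≤ a + b := by
  have hb0 : (0:Int) < b := by omega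
  obtain ⟨h1, h2⟩ := fd_bounds (a - 100) b hb0
  set k := PySem.Int.floordiv (a - 100) b with hk
  unfold dOf
  rw [← hk, max_eq_left_iff]
  constructor
  · intro h
    have h3 : 0 ≤ (k + 1) * b := mul_nonneg (by omega) (by omega)
    nlinarith
  · intro h
    by_contra hc
    push Not at hc
    have h3 : (k + 1) * b ≤ (k + 1) * 1 := mul_le_mul_of_nonpos_left hb (by omega)
    nlinarith

lemma dOf_add (a b : Int) (hb : 1 ≤ b) : dOf (a + b) b = max1dec (dOf a b) := by
  have hb0 : (0:Int) < b := by omega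
  obtain ⟨h1, h2⟩ := fd_bounds (a - 100) b hb0
  set k := PySem.Int.floordiv (a - 100) b with hk
  have hstep : PySem.Int.floordiv (a + b - 100) b = k + 1 := by
    rw [PySem.Int.floordiv_eq_iff_of_pos hb0]
    constructor <;> nlinarith
  unfold dOf max1dec
  rw [hstep, ← hk]
  rcases le_total (-k) 1 with h | h
  · rw [max_eq_left h, max_eq_left (by omega), max_eq_left (by omega)]
  · rw [max_eq_right h]
    rcases le_total (-(k+1)) 1 with h' | h'
    · rw [max_eq_left h', max_eq_left (by omega)]
    · rw [max_eq_right h', max_eq_right (by omega)]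
      omega

lemma dOf_le (a b : Int) (hb : 1 ≤ b) : dOf a b ≤ ((100 - a).toNat : Int) + 1 := by
  have hb0 : (0:Int) < b := by omega
  obtain ⟨h1, h2⟩ := fd_bounds (a - 100) b hb0
  set k := PySem.Int.floordiv (a - 100) b with hk
  unfold dOf
  rw [← hk]
  rcases le_total (-k) 1 with h | h
  · rw [max_eq_left h]; omega
  · rw [max_eq_right h]
    rcases le_or_gt (k + 1) 0 with hc | hc
    · have h3 : (k + 1) * b ≤ (k + 1) * 1 := mul_le_mul_of_nonpos_left hb hc
      have h4 : a - 100 < k + 1 := by nlinarith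
      omega
    · omega

lemma dsOf_pos (p s : List Int) : ∀ d ∈ dsOf p s, 1 ≤ d := by
  intro d hd
  rcases List.mem_map.mp hd with ⟨q, _, rfl⟩
  exact dOf_pos _ _

lemma dsOf_advance (p s : List Int) (hl : p.length ≤ s.length)
    (hs : ∀ x ∈ s.take p.length, 1 ≤ x) :
    dsOf (pvAdd p s) s = (dsOf p s).map max1dec := by
  induction p generalizing s with
  | nil => simp [dsOf, pvAdd]
  | cons a p' ih =>
    cases s with
    | nil => simp at hl
    | cons b s' =>
      have hb : 1 ≤ b := hs b (by simp)
      have hs' : ∀ x ∈ s'.take p'.length, 1 ≤ x := by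
        intro x hx
        exact hs x (by simp [List.take_succ_cons]; right; exact hx)
      have hl' : p'.length ≤ s'.length := by simpa using hl
      simp only [pvAdd, dsOf, List.zipWith, List.zip_cons_cons, List.map]
      congr 1
      · exact dOf_add a b hb
      · simpa [dsOf, pvAdd] using ih s' hl' hs'

-- takeWhile/dropWhile commute with max1dec under the shifted bound
lemma tw_dw_map (t : List Int) (d : Int) (hd : 2 ≤ d) (ht : ∀ e ∈ t, 1 ≤ e) :
    (t.map max1dec).takeWhile (fun e => decide (e ≤ d - 1)) =
      (t.takeWhile (fun e => decide (e ≤ d))).map max1dec ∧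
    (t.map max1dec).dropWhile (fun e => decide (e ≤ d - 1)) =
      (t.dropWhile (fun e => decide (e ≤ d))).map max1dec := by
  induction t with
  | nil => simp
  | cons e t' ih =>
    have he : 1 ≤ e := ht e (by simp)
    obtain ⟨ih1, ih2⟩ := ih (fun x hx => ht x (List.mem_cons_of_mem _ hx))
    by_cases hc : e ≤ d
    · have hc1 : (decide (max1dec e ≤ d - 1)) = true := by
        simp only [decide_eq_true_eq]; unfold max1dec; omega
      have hc2 : (decide (e ≤ d)) = true := by
        simp only [decide_eq_true_eq]; exact hc
      rw [List.map_cons, List.takeWhile_cons, List.dropWhile_cons,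
        List.takeWhile_cons, List.dropWhile_cons, hc1, hc2]
      simp only [if_true, List.map_cons]
      exact ⟨by rw [ih1], by rw [ih2]⟩
    · have hc1 : (decide (max1dec e ≤ d - 1)) = false := by
        simp only [decide_eq_false_iff_not]; unfold max1dec; omega
      have hc2 : (decide (e ≤ d)) = false := by
        simp only [decide_eq_false_iff_not]; exact hc
      rw [List.map_cons, List.takeWhile_cons, List.dropWhile_cons,
        List.takeWhile_cons, List.dropWhile_cons, hc1, hc2]
      simp

lemma grp_dec (l : List Int) (h1 : ∀ e ∈ l, 1 ≤ e)
    (h2 : ∀ d, l.head? = some d → 2 ≤ d) :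
    grp (l.map max1dec) = grp l := by
  induction hn : l.length using Nat.strong_induction_on generalizing l with
  | _ n ih =>
    cases l with
    | nil => simp
    | cons d t =>
      have hd : 2 ≤ d := h2 d (by simp)
      have ht : ∀ e ∈ t, 1 ≤ e := fun e he => h1 e (List.mem_cons_of_mem _ he)
      obtain ⟨htw, hdw⟩ := tw_dw_map t d hd ht
      have hd1 : max1dec d = d - 1 := by unfold max1dec; omega
      rw [List.map_cons, grp, grp, hd1, htw, hdw, List.length_map]
      congr 1
      have hlen : (t.dropWhile (fun e => decide (e ≤ d))).length < n := by
        have := List.length_dropWhile_le (fun e => decide (e ≤ d)) t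
        simp only [List.length_cons] at hn
        omega
      refine ih _ hlen _ ?_ ?_ rfl
      · intro e he
        exact ht e ((List.dropWhile_sublist _).subset he)
      · intro e he
        have := List.head?_dropWhile_not (fun e => decide (e ≤ d)) t
        rw [he] at this
        simp at this
        have h1e : 1 ≤ e := ht e ((List.dropWhile_sublist _).subset (List.mem_of_mem_head? he))
        omega

-- one outer-loop iteration, characterised through the day counts
lemma day_lemma (p : List Int) : ∀ s : List Int, p.length ≤ s.length →
    (∀ x ∈ s.take p.length, 1 ≤ x) →
    (pvPop (pvAdd p s) s).1 = (((dsOf p s).takeWhile (fun e => decide (e ≤ 1))).length : Int) ∧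
    dsOf (pvPop (pvAdd p s) s).2.1 (pvPop (pvAdd p s) s).2.2 =
      ((dsOf p s).dropWhile (fun e => decide (e ≤ 1))).map max1dec ∧
    (pvPop (pvAdd p s) s).2.1.length ≤ (pvPop (pvAdd p s) s).2.2.length ∧
    (∀ x ∈ (pvPop (pvAdd p s) s).2.2.take (pvPop (pvAdd p s) s).2.1.length, 1 ≤ x) := by
  induction p with
  | nil =>
    intro s hl hs
    simp [pvAdd, pvPop, dsOf]
  | cons a p' ih =>
    intro s hl hs
    cases s with
    | nil => simp at hl
    | cons b s' =>
      have hb : 1 ≤ b := hs b (by simp)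
      have hs' : ∀ x ∈ s'.take p'.length, 1 ≤ x := by
        intro x hx
        exact hs x (by simp [List.take_succ_cons]; right; exact hx)
      have hl' : p'.length ≤ s'.length := by simpa using hl
      have hD : dsOf (a :: p') (b :: s') = dOf a b :: dsOf p' s' := by
        simp [dsOf]
      by_cases h100 : 100 ≤ a + b
      · -- the front feature completes today and is popped
        have hd1 : dOf a b = 1 := (dOf_eq_one_iff a b hb).mpr h100
        obtain ⟨ih1, ih2, ih3, ih4⟩ := ih s' hl' hs'
        have hpop : pvPop (pvAdd (a :: p') (b :: s')) (b :: s') =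
            ((pvPop (pvAdd p' s') s').1 + 1, (pvPop (pvAdd p' s') s').2) := by
          simp [pvAdd, pvPop, h100]
        rw [hpop, hD]
        refine ⟨?_, ?_, ih3, ih4⟩
        · rw [List.takeWhile_cons]
          simp only [hd1, show decide ((1:Int) ≤ 1) = true from by simp, if_true,
            List.length_cons]
          push_cast
          omega
        · rw [List.dropWhile_cons]
          simp only [hd1, show decide ((1:Int) ≤ 1) = true from by simp, if_true]
          exact ih2
      · -- the front feature is not done: nothing is popped today
        have hd2 : 2 ≤ dOf a b := by
          have h1 := dOf_pos a b
          have := dOf_eq_one_iff a b hb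
          omega
        have hpop : pvPop (pvAdd (a :: p') (b :: s')) (b :: s') =
            (0, (a + b) :: pvAdd p' s', b :: s') := by
          simp [pvAdd, pvPop, show ¬ (100 ≤ a + b) from h100]
        rw [hpop, hD]
        have hdec : decide (dOf a b ≤ 1) = false := by
          simp only [decide_eq_false_iff_not]; omega
        refine ⟨?_, ?_, ?_, ?_⟩
        · rw [List.takeWhile_cons, hdec]
          simp
        · rw [List.dropWhile_cons, hdec]
          simp only [Bool.false_eq_true, if_false, ← hD]
          exact dsOf_advance (a :: p') (b :: s') hl hs
        · simp only [pvAdd, List.length_cons, List.length_zipWith]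
          omega
        · intro x hx
          apply hs x
          simp only [pvAdd] at hx ⊢
          have hlen : (List.zipWith (· + ·) p' s').length ≤ p'.length := by
            simp
          revert hx
          have : (b :: s').take (((a + b) :: List.zipWith (· + ·) p' s').length) =
              ((b :: s').take ((a :: p').length)).take (((a + b) :: List.zipWith (· + ·) p' s').length) := by
            rw [List.take_take]
            congr 1
            simp only [List.length_cons, List.length_zipWith]
            omega
          rw [this]
          exact fun hx => (List.take_sublist _ _).subset hx

lemma maxD_bound (l : List Int) (m : Int) (hm : 0 ≤ m) (h : ∀ e ∈ l, e ≤ m) :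
    l.foldr max 0 ≤ m := by
  induction l with
  | nil => simpa using hm
  | cons a t ih =>
    simp only [List.foldr]
    exact max_le (h a (List.mem_cons_self)) (ih (fun e he => h e (List.mem_cons_of_mem _ he)))

lemma le_maxD (l : List Int) (e : Int) (he : e ∈ l) : e ≤ l.foldr max 0 := by
  induction l with
  | nil => cases he
  | cons a t ih =>
    rcases List.mem_cons.mp he with rfl | h
    · exact le_max_left _ _
    · exact le_trans (ih h) (le_max_right _ _)

lemma maxD_fuel (p : List Int) : ∀ s : List Int, p.length ≤ s.length →
    (∀ x ∈ s.take p.length, 1 ≤ x) →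
    (dsOf p s).foldr max 0 ≤ (((p.map (fun x => (100 - x).toNat + 1)).sum : Nat) : Int) := by
  induction p with
  | nil => intro s _ _; simp [dsOf]
  | cons a p' ih =>
    intro s hl hs
    cases s with
    | nil => simp at hl
    | cons b s' =>
      have hb : 1 ≤ b := hs b (by simp)
      have hs' : ∀ x ∈ s'.take p'.length, 1 ≤ x := by
        intro x hx
        exact hs x (by simp [List.take_succ_cons]; right; exact hx)
      have hl' : p'.length ≤ s'.length := by simpa using hl
      have h1 := dOf_le a b hb
      have h2 := ih s' hl' hs'
      simp only [dsOf, List.zip_cons_cons, List.map_cons, List.foldr] at h2 ⊢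
      simp only [List.sum_cons]
      have key : ((((100 - a).toNat + 1 + (List.map (fun x => (100 - x).toNat + 1) p').sum : Nat)) : Int)
          = ((100 - a).toNat : Int) + 1 + (((List.map (fun x => (100 - x).toNat + 1) p').sum : Nat) : Int) := by
        push_cast
        ring
      rw [key]
      have hS : (0:Int) ≤ (((List.map (fun x => (100 - x).toNat + 1) p').sum : Nat) : Int) := by positivity
      exact max_le (by omega) (by omega)

lemma maxD_next (D : List Int) (hpos : ∀ e ∈ D, 1 ≤ e) (hne : D ≠ []) :
    (((D.dropWhile (fun e => decide (e ≤ 1))).map max1dec).foldr max 0) ≤ D.foldr max 0 - 1 := by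
  cases hW : D.dropWhile (fun e => decide (e ≤ 1)) with
  | nil =>
    obtain ⟨d, t, rfl⟩ := List.exists_cons_of_ne_nil hne
    have h1 := le_maxD (d :: t) d (by simp)
    have h2 := hpos d (by simp)
    simp only [List.map_nil, List.foldr_nil]
    omega
  | cons e0 W' =>
    have he0D : e0 ∈ D := (List.dropWhile_sublist _).subset
      (by rw [hW]; exact List.mem_cons_self : e0 ∈ D.dropWhile (fun e => decide (e ≤ 1)))
    have he0 : ¬ (e0 ≤ 1) := by
      have h := List.head?_dropWhile_not (fun e => decide (e ≤ 1)) D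
      rw [hW] at h
      simpa using h
    have hM2 : 2 ≤ D.foldr max 0 := le_trans (by omega) (le_maxD D e0 he0D)
    apply maxD_bound
    · omega
    · intro x hx
      rcases List.mem_map.mp hx with ⟨e, heW, rfl⟩
      have heD : e ∈ D := (List.dropWhile_sublist _).subset
        (by rw [hW]; exact heW : e ∈ D.dropWhile (fun e => decide (e ≤ 1)))
      have h1 := hpos e heD
      have h2 := le_maxD D e heD
      unfold max1dec
      omega

lemma sim_eq (f : Nat) : ∀ (p s ans : List Int), p.length ≤ s.length →
    (∀ x ∈ s.take p.length, 1 ≤ x) →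
    ((dsOf p s).foldr max 0).toNat < f →
    pvSim f p s ans = ans ++ grp (dsOf p s) := by
  induction f with
  | zero => intro p s ans _ _ h; omega
  | succ f ih =>
    intro p s ans hl hs hf
    cases p with
    | nil => simp [pvSim, dsOf, grp]
    | cons a p' =>
      cases s with
      | nil => simp at hl
      | cons b s' =>
        obtain ⟨hcnt, hds, hlen, htake⟩ := day_lemma (a :: p') (b :: s') hl hs
        set r := pvPop (pvAdd (a :: p') (b :: s')) (b :: s') with hr
        set D := dsOf (a :: p') (b :: s') with hDdef
        have hDt : D = dOf a b :: dsOf p' s' := by simp [hDdef, dsOf]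
        have hDpos : ∀ e ∈ D, 1 ≤ e := dsOf_pos _ _
        have hstep : pvSim (f + 1) (a :: p') (b :: s') ans
            = pvSim f r.2.1 r.2.2 (if r.1 = 0 then ans else ans ++ [r.1]) := by
          simp only [pvSim, List.isEmpty_cons, Bool.false_eq_true, if_false]
          rw [← hr]
          congr 1
          by_cases hz : r.1 = 0
          · simp [hz]
          · simp [hz]
        have hMpos : 1 ≤ D.foldr max 0 := by
          have := le_maxD D (dOf a b) (by rw [hDt]; simp)
          have := dOf_pos a b
          omega
        have hnext : ((dsOf r.2.1 r.2.2).foldr max 0).toNat < f := by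
          rw [hds]
          have h := maxD_next D hDpos (by rw [hDt]; simp)
          omega
        rw [hstep, ih r.2.1 r.2.2 _ hlen htake hnext, hds]
        set d := dOf a b with hdd
        by_cases hd1 : d ≤ 1
        · -- the front feature completes today: one group is emitted
          have hd : d = 1 := by
            have := hDpos d (by rw [hDt]; simp)
            omega
          have hdec : decide (d ≤ 1) = true := by simp [hd]
          have htw : D.takeWhile (fun e => decide (e ≤ 1)) =
              d :: (dsOf p' s').takeWhile (fun e => decide (e ≤ 1)) := by
            rw [hDt, List.takeWhile_cons, hdec]
            simp
          have hdw : D.dropWhile (fun e => decide (e ≤ 1)) =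
              (dsOf p' s').dropWhile (fun e => decide (e ≤ 1)) := by
            rw [hDt, List.dropWhile_cons, hdec]
            simp
          have hW2 : ∀ e, (D.dropWhile (fun e => decide (e ≤ 1))).head? = some e → 2 ≤ e := by
            intro e he
            have h := List.head?_dropWhile_not (fun e => decide (e ≤ 1)) D
            rw [he] at h
            simp only [decide_eq_false_iff_not] at h
            have h1 : 1 ≤ e := hDpos e
              ((List.dropWhile_sublist _).subset (List.mem_of_mem_head? he))
            omega
          have hWpos : ∀ e ∈ D.dropWhile (fun e => decide (e ≤ 1)), 1 ≤ e :=
            fun e he => hDpos e ((List.dropWhile_sublist _).subset he)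
          rw [grp_dec _ hWpos hW2]
          have hne : ¬ r.1 = 0 := by
            rw [hcnt, htw]
            simp only [List.length_cons]
            push_cast
            omega
          rw [if_neg hne, hcnt, htw]
          -- right-hand side: unfold one step of grp
          conv_rhs => rw [hDt, grp]
          rw [hdw, hd]
          simp only [List.length_cons, List.append_assoc, List.cons_append, List.nil_append]
          congr 2
          push_cast
          ring
        · -- nothing completes today: answer unchanged
          have hdec : decide (d ≤ 1) = false := by simp; omega
          have htw : D.takeWhile (fun e => decide (e ≤ 1)) = [] := by
            rw [hDt, List.takeWhile_cons, hdec]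
            simp
          have hdw : D.dropWhile (fun e => decide (e ≤ 1)) = D := by
            rw [hDt, List.dropWhile_cons, hdec]
            simp [← hDt]
          have hz : r.1 = 0 := by
            rw [hcnt, htw]
            simp
          rw [if_pos hz, hdw]
          rw [grp_dec D hDpos (by
            intro e he
            rw [hDt] at he
            simp only [List.head?_cons, Option.some.injEq] at he
            omega)]

lemma altLoop_eq (l : List (Int × Int)) : ∀ (m c : Int) (ans : List Int), 1 ≤ c →
    altLoop l m c ans =
      ans ++ (c + (((l.map (fun q => dOf q.1 q.2)).takeWhile (fun e => decide (e ≤ m))).length : Int)) ::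
        grp ((l.map (fun q => dOf q.1 q.2)).dropWhile (fun e => decide (e ≤ m))) := by
  induction l with
  | nil =>
    intro m c ans hc
    simp only [altLoop, List.map_nil, List.takeWhile_nil, List.dropWhile_nil, List.length_nil]
    rw [if_pos (by omega : c ≠ 0)]
    simp [grp]
  | cons q t ihl =>
    obtain ⟨pi, si⟩ := q
    intro m c ans hc
    by_cases h : m < dOf pi si
    · have hdec : decide (dOf pi si ≤ m) = false := by simp; omega
      simp only [altLoop, if_pos h]
      rw [if_pos (by omega : c ≠ 0), ihl _ _ _ le_rfl]
      simp only [List.map_cons, List.takeWhile_cons, List.dropWhile_cons, hdec,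
        Bool.false_eq_true, if_false, List.length_nil]
      conv_rhs => rw [grp]
      simp [List.append_assoc]
    · have hdec : decide (dOf pi si ≤ m) = true := by simp; omega
      simp only [altLoop, if_neg h]
      rw [ihl _ _ _ (by omega : (1:Int) ≤ c + 1)]
      simp only [List.map_cons, List.takeWhile_cons, List.dropWhile_cons, hdec, if_true,
        List.length_cons]
      congr 2
      push_cast
      ring

lemma alt_eq_grp (p s : List Int) : solution_alt p s = grp (dsOf p s) := by
  unfold solution_alt dsOf
  cases hz : p.zip s with
  | nil => simp [altLoop, grp]
  | cons q t =>
    obtain ⟨a, b⟩ := q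
    have h1 : (0:Int) < dOf a b := by have := dOf_pos a b; omega
    simp only [altLoop, if_pos h1]
    rw [if_neg (by simp), altLoop_eq t (dOf a b) 1 [] le_rfl]
    simp only [List.nil_append, List.map_cons]
    conv_rhs => rw [grp]

-- ===== VERDICT (by name: the statement is the Claim_ definition above) =====
theorem solution_spec : Claim_equal_solution := by
  intro p s _ hpre
  unfold Spec_solution
  rw [alt_eq_grp]
  unfold solution
  exact sim_eq _ p s [] hpre.1 hpre.2 (by
    have := maxD_fuel p s hpre.1 hpre.2
    omega)
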